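-- pv_equiv track=rewrite | github.com/lakewood999/cmsc421-final-project | api.py | hf_preprocess_text
-- ===== SOURCE A (Python) =====
-- def hf_preprocess_text(words: str) -> str:
--     new_text = []
--     for t in words.split(" "):
--         t = 'u/user' if t.startswith('u/') and len(t) > 2 else t
--         t = 'r/sub' if t.startswith('r/') and len(t) > 2 else t
--         t = 'http' if t.startswith('http') else t
--         new_text.append(t)
--     return " ".join(new_text)
-- ===== SOURCE B (Python) =====
-- def hf_preprocess_text(words: str) -> str:
--     # single left-to-right character scan; no split/join of an intermediate token list
--     def norm(t):
--         if t.startswith('http'):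
--             return 'http'
--         if t.startswith('u/') and len(t) > 2:
--             return 'u/user'
--         if t.startswith('r/') and len(t) > 2:
--             return 'r/sub'
--         return t
--     out = []
--     tok = []
--     for c in words:
--         if c == ' ':
--             out.append(norm(''.join(tok)))
--             out.append(' ')
--             tok = []
--         else:
--             tok.append(c)
--     out.append(norm(''.join(tok)))
--     return ''.join(out)
-- ===== Notes on version B (the rewrite author's own statement) =====
-- stated objective: alternative
-- what changed: Replaces the split-on-space / rewrite-each-token / join pipeline with a single left-to-right character scan that emits the output in one pass, normalizing each maximal non-space run via one if/elif cascade (the three ordered reassignments collapse because the prefixes are mutually exclusive).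
import Mathlib
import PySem

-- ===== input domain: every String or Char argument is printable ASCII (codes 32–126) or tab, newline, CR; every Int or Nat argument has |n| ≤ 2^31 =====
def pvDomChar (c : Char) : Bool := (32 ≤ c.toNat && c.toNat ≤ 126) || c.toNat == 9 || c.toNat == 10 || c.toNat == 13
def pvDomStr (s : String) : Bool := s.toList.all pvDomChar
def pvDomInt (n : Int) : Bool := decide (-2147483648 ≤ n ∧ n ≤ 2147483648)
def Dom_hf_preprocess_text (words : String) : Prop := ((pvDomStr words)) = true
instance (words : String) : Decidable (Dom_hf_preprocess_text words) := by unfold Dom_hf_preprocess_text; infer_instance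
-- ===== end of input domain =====

-- B replaces A's split(" ")/rewrite-each-token/join with a single character scan building
-- the output in one pass (objective: alternative, same asymptotic cost).


-- ===== PORT A =====
-- the three ordered reassignments of A's loop body
def pvAStep (t : List Char) : List Char :=
  let t := if PySem.Chars.startswith t ['u', '/'] && decide (PySem.Chars.len t > 2) then ['u', '/', 'u', 's', 'e', 'r'] else t
  let t := if PySem.Chars.startswith t ['r', '/'] && decide (PySem.Chars.len t > 2) then ['r', '/', 's', 'u', 'b'] else t
  let t := if PySem.Chars.startswith t ['h', 't', 't', 'p'] then ['h', 't', 't', 'p'] else t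
  t

def hf_preprocess_text (words : String) : String :=
  let new_text := (PySem.Chars.splitOn words.toList [' ']).foldl (fun acc t => acc ++ [pvAStep t]) []
  String.ofList (PySem.Chars.join [' '] new_text)

-- ===== PORT B =====
-- Source B's norm: one if/elif cascade
def pvBNorm (t : List Char) : List Char :=
  if PySem.Chars.startswith t ['h', 't', 't', 'p'] then ['h', 't', 't', 'p']
  else if PySem.Chars.startswith t ['u', '/'] && decide (PySem.Chars.len t > 2) then ['u', '/', 'u', 's', 'e', 'r']
  else if PySem.Chars.startswith t ['r', '/'] && decide (PySem.Chars.len t > 2) then ['r', '/', 's', 'u', 'b']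
  else t

def hf_preprocess_text_alt (words : String) : String :=
  let st := words.toList.foldl
    (fun (st : List (List Char) × List Char) c =>
      if c = ' ' then (st.1 ++ [pvBNorm st.2] ++ [[' ']], [])
      else (st.1, st.2 ++ [c]))
    ([], [])
  String.ofList ((st.1 ++ [pvBNorm st.2]).flatten)

-- ===== PRECONDITION & SPEC =====
def Spec_hf_preprocess_text (words : String) (out : String) : Prop := out = hf_preprocess_text_alt words
instance (words : String) (out : String) : Decidable (Spec_hf_preprocess_text words out) := by unfold Spec_hf_preprocess_text; infer_instance

-- ===== CLAIM (what is proved, stated in full; the proofs are below) =====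
def Claim_equal_hf_preprocess_text : Prop := ∀ (words : String), Dom_hf_preprocess_text words → Spec_hf_preprocess_text words (hf_preprocess_text words)

-- ===== LEMMAS AND PROOFS =====

-- reference split on a single space (split(" ") semantics, keeps empty tokens)
def pvSplitSp : List Char → List (List Char)
  | [] => [[]]
  | c :: rest =>
    if c = ' ' then [] :: pvSplitSp rest
    else
      match pvSplitSp rest with
      | [] => [[c]]
      | t :: ts => (c :: t) :: ts

theorem pvSplitSp_ne_nil (l : List Char) : pvSplitSp l ≠ [] := by
  cases l with
  | nil => simp [pvSplitSp]
  | cons c rest =>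
    simp only [pvSplitSp]
    split <;> simp_all
    split <;> simp

theorem pv_go_eq (fuel : Nat) (l cur : List Char) (acc : List (List Char))
    (h : l.length < fuel) :
    PySem.Chars.splitOn.go [' '] fuel l cur acc
      = acc.reverse ++ (pvSplitSp l).modifyHead (cur.reverse ++ ·) := by
  induction fuel generalizing l cur acc with
  | zero => omega
  | succ n ih =>
    cases l with
    | nil => simp [PySem.Chars.splitOn.go, pvSplitSp]
    | cons c rest =>
      by_cases hc : c = ' '
      · subst hc
        rw [PySem.Chars.splitOn.go]
        rw [if_pos (by simp)]
        rw [ih _ _ _ (by simpa using Nat.lt_of_succ_lt_succ h)]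
        rcases hsp : pvSplitSp rest with _ | ⟨a, as⟩
        · exact absurd hsp (pvSplitSp_ne_nil rest)
        · simp [pvSplitSp, hsp]
      · rw [PySem.Chars.splitOn.go]
        rw [if_neg (by simp; exact fun hh => hc hh.symm)]
        rw [ih _ _ _ (by simpa using Nat.lt_of_succ_lt_succ h)]
        simp only [pvSplitSp, if_neg hc]
        rcases hsp : pvSplitSp rest with _ | ⟨t, ts⟩
        · exact absurd hsp (pvSplitSp_ne_nil rest)
        · simp

theorem pv_splitOn_sp (s : List Char) :
    PySem.Chars.splitOn s [' '] = pvSplitSp s := by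
  rw [PySem.Chars.splitOn, pv_go_eq _ _ _ _ (by omega)]
  rcases hsp : pvSplitSp s with _ | ⟨t, ts⟩
  · exact absurd hsp (pvSplitSp_ne_nil s)
  · simp

-- two distinct nonempty prefixes with different first characters cannot both start t
theorem pv_two_prefix_false (t : List Char) (p q : List Char) (c d : Char)
    (hp : PySem.Chars.startswith t (c :: p) = true)
    (hq : PySem.Chars.startswith t (d :: q) = true) (hcd : c ≠ d) : False := by
  rw [PySem.Chars.startswith_iff] at hp hq
  obtain ⟨r1, h1⟩ := hp
  obtain ⟨r2, h2⟩ := hq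
  rw [← h2] at h1
  simp at h1
  exact hcd h1.1

-- the two token normalizers agree (the prefixes are mutually exclusive)
theorem pvAStep_eq_bNorm (t : List Char) : pvAStep t = pvBNorm t := by
  unfold pvAStep pvBNorm
  cases hu : PySem.Chars.startswith t ['u', '/'] with
  | true =>
    have hh : PySem.Chars.startswith t ['h', 't', 't', 'p'] = false := by
      cases hx : PySem.Chars.startswith t ['h', 't', 't', 'p']
      · rfl
      · exact (pv_two_prefix_false t _ _ _ _ hu hx (by decide)).elim
    have hr : PySem.Chars.startswith t ['r', '/'] = false := by
      cases hx : PySem.Chars.startswith t ['r', '/']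
      · rfl
      · exact (pv_two_prefix_false t _ _ _ _ hu hx (by decide)).elim
    cases hlen : decide (PySem.Chars.len t > 2) <;>
      (simp [hu, hr, hh, hlen]; try decide)
  | false =>
    cases hr : PySem.Chars.startswith t ['r', '/'] with
    | true =>
      have hh : PySem.Chars.startswith t ['h', 't', 't', 'p'] = false := by
        cases hx : PySem.Chars.startswith t ['h', 't', 't', 'p']
        · rfl
        · exact (pv_two_prefix_false t _ _ _ _ hr hx (by decide)).elim
      cases hlen : decide (PySem.Chars.len t > 2)
      · have hlen' : ¬ (2 < t.length) := by
          have h2 := of_decide_eq_false hlen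
          simp [PySem.Chars.len] at h2
          omega
        simp [hu, hr, hh, hlen']
      · have hlen' : 2 < t.length := by
          have h2 := of_decide_eq_true hlen
          simp [PySem.Chars.len] at h2
          omega
        simp [hu, hr, hh, hlen']
        decide
    | false =>
      cases hh : PySem.Chars.startswith t ['h', 't', 't', 'p'] <;>
        cases hlen : decide (PySem.Chars.len t > 2) <;>
          simp [hu, hr, hh, hlen]

-- join with a single-space separator, unfolded over the token list
theorem pv_join_cons (g : List Char → List Char) (t : List Char) (ts : List (List Char)) :
    PySem.Chars.join [' '] ((t :: ts).map g)
      = g t ++ ts.flatMap (fun u => ' ' :: g u) := by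
  induction ts generalizing t with
  | nil => simp [PySem.Chars.join, List.intercalate]
  | cons u us ih =>
    rw [List.map_cons, List.map_cons, PySem.Chars.join_cons_cons, ← List.map_cons, ih]
    simp

-- B's scan, characterized against pvSplitSp
theorem pv_b_loop (l : List Char) (out : List (List Char)) (tok : List Char) :
    (let st := l.foldl
        (fun (st : List (List Char) × List Char) c =>
          if c = ' ' then (st.1 ++ [pvBNorm st.2] ++ [[' ']], [])
          else (st.1, st.2 ++ [c]))
        (out, tok)
     (st.1 ++ [pvBNorm st.2]).flatten)
      = out.flatten ++
        (match pvSplitSp l with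
         | [] => []
         | t :: ts => pvBNorm (tok ++ t) ++ ts.flatMap (fun u => ' ' :: pvBNorm u)) := by
  induction l generalizing out tok with
  | nil => simp [pvSplitSp]
  | cons c rest ih =>
    by_cases hc : c = ' '
    · subst hc
      simp only [List.foldl_cons]
      rw [ih]
      rcases hsp : pvSplitSp rest with _ | ⟨t, ts⟩
      · exact absurd hsp (pvSplitSp_ne_nil rest)
      · simp [pvSplitSp, hsp]
    · simp only [List.foldl_cons, if_neg hc]
      rw [ih]
      rcases hsp : pvSplitSp rest with _ | ⟨t, ts⟩
      · exact absurd hsp (pvSplitSp_ne_nil rest)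
      · simp [pvSplitSp, hc, hsp]

-- ===== VERDICT (by name: the statement is the Claim_ definition above) =====
theorem hf_preprocess_text_spec : Claim_equal_hf_preprocess_text := by
  intro words _
  unfold Spec_hf_preprocess_text hf_preprocess_text hf_preprocess_text_alt
  dsimp only
  rw [pv_splitOn_sp, PySem.List.foldl_append_singleton_eq_map]
  have hb := pv_b_loop words.toList [] []
  dsimp only at hb
  simp only [List.flatten_nil, List.nil_append] at hb
  rw [hb]
  rcases hsp : pvSplitSp words.toList with _ | ⟨t, ts⟩
  · exact absurd hsp (pvSplitSp_ne_nil _)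
  · simp only [List.nil_append]
    rw [pv_join_cons]
    simp [pvAStep_eq_bNorm]
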